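-- pv_equiv track=rewrite | github.com/sachinshelke/ToolsConnector | scripts/generate_readmes.py | _best_first_action
-- ===== SOURCE A (Python) =====
-- def _best_first_action(actions: dict, connector_name: str) -> str:
--     """Pick the most useful action for quickstart."""
--     preferred = [
--         "list_emails", "list_messages", "list_files", "list_events",
--         "list_repos", "list_channels", "list_contacts", "list_issues",
--         "list_records", "list_tasks", "list_products", "list_projects",
--         "list_tickets", "list_users", "list_boards", "list_cards",
--         "list_pages", "list_databases", "list_incidents", "list_queues",
--         "list_deployments", "list_vectors",
--         "get_values", "get_spreadsheet", "get_document",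
--         "search", "query", "send_message",
--     ]
--     for name in preferred:
--         if name in actions:
--             return name
--     for aname in sorted(actions.keys()):
--         if aname.startswith("list_") or aname.startswith("get_"):
--             return aname
--     return sorted(actions.keys())[0] if actions else ""
-- ===== SOURCE B (Python) =====
-- PREFERRED = [
--     "list_emails", "list_messages", "list_files", "list_events",
--     "list_repos", "list_channels", "list_contacts", "list_issues",
--     "list_records", "list_tasks", "list_products", "list_projects",
--     "list_tickets", "list_users", "list_boards", "list_cards",
--     "list_pages", "list_databases", "list_incidents", "list_queues",
--     "list_deployments", "list_vectors",
--     "get_values", "get_spreadsheet", "get_document",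
--     "search", "query", "send_message",
-- ]
--
-- _RANK = {name: i for i, name in enumerate(PREFERRED)}
--
--
-- def _best_first_action(actions: dict, connector_name: str) -> str:
--     """Pick the most useful action for quickstart."""
--     candidates = [a for a in actions if a in _RANK]
--     if candidates:
--         return min(candidates, key=_RANK.get)
--     fallback = [a for a in actions
--                 if a.startswith("list_") or a.startswith("get_")]
--     if fallback:
--         return min(fallback)
--     return min(actions) if actions else ""
-- ===== Notes on version B (the rewrite author's own statement) =====
-- stated objective: faster
-- what changed: Replaces A's sequential probe of the 28-name preferred list and its two sorted() passes by single scans of the action keys against a precomputed {name: index} rank table: min(candidates, key=rank.get) for the preferred stage, min() over the filtered keys for the fallback, min(actions) for the last resort.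
import Mathlib
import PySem

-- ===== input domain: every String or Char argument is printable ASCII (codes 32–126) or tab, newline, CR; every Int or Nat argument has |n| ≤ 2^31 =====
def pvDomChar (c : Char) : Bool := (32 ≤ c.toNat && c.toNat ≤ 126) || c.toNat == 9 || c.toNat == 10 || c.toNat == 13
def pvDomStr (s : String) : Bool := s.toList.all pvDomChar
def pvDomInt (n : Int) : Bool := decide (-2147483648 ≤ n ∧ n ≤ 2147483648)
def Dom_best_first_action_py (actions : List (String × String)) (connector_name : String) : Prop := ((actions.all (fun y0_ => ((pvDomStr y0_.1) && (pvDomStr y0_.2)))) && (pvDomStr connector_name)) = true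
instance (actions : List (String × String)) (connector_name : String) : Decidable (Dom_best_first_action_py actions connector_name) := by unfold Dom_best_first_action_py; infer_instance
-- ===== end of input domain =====

-- B replaces A's sequential probing of the preferred list and its two sorts by single scans of the
-- action keys against a precomputed rank table (min by rank / lexicographic min); same return value.

-- the preferred-action table, identical data in both Pythons (module constant in Source B)
def pvPreferred : List String := [
  "list_emails", "list_messages", "list_files", "list_events",
  "list_repos", "list_channels", "list_contacts", "list_issues",
  "list_records", "list_tasks", "list_products", "list_projects",
  "list_tickets", "list_users", "list_boards", "list_cards",
  "list_pages", "list_databases", "list_incidents", "list_queues",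
  "list_deployments", "list_vectors",
  "get_values", "get_spreadsheet", "get_document",
  "search", "query", "send_message"]

-- ===== PORT A =====
-- for name in preferred: if name in actions: return name;
-- then first sorted key starting with "list_"/"get_"; then sorted(actions.keys())[0] if actions else ""
def best_first_action_py (actions : List (String × String)) (connector_name : String) : String :=
  let keys := actions.map (·.1)
  match pvPreferred.find? (fun name => keys.contains name) with
  | some name => name
  | none =>
    let skeys := PySem.List.sorted keys (fun x => x) false
    match skeys.find? (fun aname => PySem.Str.startswith aname "list_" || PySem.Str.startswith aname "get_") with
    | some aname => aname
    | none => if actions.isEmpty then "" else PySem.List.pyGetD skeys 0 ""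

-- ===== PORT B =====
-- rank = {name: i for i, name in enumerate(PREFERRED)}
def pvRank : PySem.Dict String Int :=
  PySem.Dict.ofList ((PySem.List.enumerate pvPreferred 0).map (fun p => (p.2, p.1)))

def best_first_action_py_alt (actions : List (String × String)) (connector_name : String) : String :=
  let candidates := (actions.map (·.1)).filter (fun a => pvRank.contains a)
  match PySem.List.min? candidates (fun a => pvRank.getD a 0) with
  | some m => m
  | none =>
    let fallback := (actions.map (·.1)).filter (fun a => PySem.Str.startswith a "list_" || PySem.Str.startswith a "get_")
    match PySem.List.min? fallback (fun x => x) with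
    | some m => m
    | none => if actions.isEmpty then "" else (PySem.List.min? (actions.map (·.1)) (fun x => x)).getD ""

-- ===== PRECONDITION & SPEC =====
def Spec_best_first_action_py (actions : List (String × String)) (connector_name : String) (out : String) : Prop := out = best_first_action_py_alt actions connector_name
instance (actions : List (String × String)) (connector_name : String) (out : String) : Decidable (Spec_best_first_action_py actions connector_name out) := by unfold Spec_best_first_action_py; infer_instance

-- ===== CLAIM (what is proved, stated in full; the proofs are below) =====
def Claim_equal_best_first_action_py : Prop := ∀ (actions : List (String × String)) (connector_name : String), Dom_best_first_action_py actions connector_name → Spec_best_first_action_py actions connector_name (best_first_action_py actions connector_name)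

-- ===== LEMMAS AND PROOFS =====

-- the rank dict's keys are exactly the preferred names, in order
lemma pvRank_keys : pvRank.keys = pvPreferred := by decide

lemma pvRank_mem (a : String) : pvRank.contains a = true ↔ a ∈ pvPreferred := by
  rw [PySem.Dict.contains_iff_mem_keys, pvRank_keys]

lemma pvRank_getD_range : ∀ i ∈ List.range pvPreferred.length,
    pvRank.getD (pvPreferred.getD i "") 0 = (i : Int) := by decide

-- the rank of the i-th preferred name is i
lemma pvRank_getD (i : Nat) (h : i < pvPreferred.length) :
    pvRank.getD pvPreferred[i] 0 = (i : Int) := by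
  have := pvRank_getD_range i (List.mem_range.mpr h)
  rwa [List.getD_eq_getElem _ _ h] at this

-- stage 1: first preferred name present among the keys = key of minimal rank
lemma stage1 (keys : List String) :
    pvPreferred.find? (fun name => keys.contains name)
      = PySem.List.min? (keys.filter (fun a => pvRank.contains a)) (fun a => pvRank.getD a 0) := by
  cases hf : pvPreferred.find? (fun name => keys.contains name) with
  | none =>
    rw [List.find?_eq_none] at hf
    have hS : keys.filter (fun a => pvRank.contains a) = [] := by
      rw [List.filter_eq_nil_iff]
      intro a ha hc
      exact hf a ((pvRank_mem a).mp hc) (by simpa using ha)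
    rw [hS]
    rfl
  | some m =>
    rw [List.find?_eq_some_iff_getElem] at hf
    obtain ⟨hm, i, hi, hPi, hprev⟩ := hf
    have hmk : m ∈ keys := by simpa using hm
    have hmP : m ∈ pvPreferred := hPi ▸ List.getElem_mem hi
    have hmS : m ∈ keys.filter (fun a => pvRank.contains a) :=
      List.mem_filter.mpr ⟨hmk, (pvRank_mem m).mpr hmP⟩
    cases hmin : PySem.List.min? (keys.filter (fun a => pvRank.contains a)) (fun a => pvRank.getD a 0) with
    | none =>
      rw [PySem.List.min?_eq_none_iff] at hmin
      rw [hmin] at hmS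
      cases hmS
    | some m' =>
      have hm'S := PySem.List.min?_mem hmin
      have hle := PySem.List.min?_isMin hmin m hmS
      obtain ⟨hm'k, hc'⟩ := List.mem_filter.mp hm'S
      have hm'P : m' ∈ pvPreferred := (pvRank_mem m').mp hc'
      obtain ⟨i', hi', hPi'⟩ := List.mem_iff_getElem.mp hm'P
      have r1 : pvRank.getD m' 0 = (i' : Int) := hPi' ▸ pvRank_getD i' hi'
      have r2 : pvRank.getD m 0 = (i : Int) := hPi ▸ pvRank_getD i hi
      rw [r1, r2] at hle
      have hnotlt : ¬ i' < i := by
        intro hlt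
        have hj := hprev i' hlt
        rw [hPi'] at hj
        simp only [Bool.not_eq_eq_eq_not, Bool.not_true] at hj
        rw [List.contains_eq_mem] at hj
        simp [hm'k] at hj
      have hii : i' = i := by omega
      subst hii
      rw [← hPi, ← hPi']

-- stage 2: first sorted key satisfying q = lexicographic min of the keys satisfying q
lemma stage2 (keys : List String) (q : String → Bool) :
    (PySem.List.sorted keys (fun x => x) false).find? q
      = PySem.List.min? (keys.filter q) (fun x => x) := by
  have hperm := PySem.List.sorted_perm keys (fun x => x) false
  cases hf : (PySem.List.sorted keys (fun x => x) false).find? q with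
  | none =>
    rw [List.find?_eq_none] at hf
    have hS : keys.filter q = [] := by
      rw [List.filter_eq_nil_iff]
      intro a ha hq
      exact hf a (hperm.mem_iff.mpr ha) hq
    rw [hS]
    rfl
  | some a =>
    rw [List.find?_eq_some_iff_getElem] at hf
    obtain ⟨hqa, i, hi, hsi, hprev⟩ := hf
    have hak : a ∈ keys := hperm.mem_iff.mp (hsi ▸ List.getElem_mem hi)
    have haS : a ∈ keys.filter q := List.mem_filter.mpr ⟨hak, hqa⟩
    cases hmin : PySem.List.min? (keys.filter q) (fun x => x) with
    | none =>
      rw [PySem.List.min?_eq_none_iff] at hmin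
      rw [hmin] at haS
      cases haS
    | some m' =>
      have hm'S := PySem.List.min?_mem hmin
      have h1 : m' ≤ a := PySem.List.min?_isMin hmin a haS
      obtain ⟨hm'k, hqm'⟩ := List.mem_filter.mp hm'S
      obtain ⟨j, hj, hsj⟩ := List.mem_iff_getElem.mp (hperm.mem_iff.mpr hm'k)
      have hij : i ≤ j := by
        by_contra hlt
        rw [Nat.not_le] at hlt
        have hb := hprev j hlt
        rw [hsj] at hb
        simp [hqm'] at hb
      have h2 : a ≤ m' := by
        rw [← hsi, ← hsj]
        exact PySem.List.sorted_id_getElem_mono keys hij hj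
      rw [le_antisymm h2 h1]

-- stage 3: sorted(keys)[0] = min(keys) for nonempty keys
lemma stage3 (keys : List String) (h : keys ≠ []) :
    PySem.List.pyGetD (PySem.List.sorted keys (fun x => x) false) 0 ""
      = (PySem.List.min? keys (fun x => x)).getD "" := by
  have hperm := PySem.List.sorted_perm keys (fun x => x) false
  have hsne : PySem.List.sorted keys (fun x => x) false ≠ [] := by
    rw [Ne, PySem.List.sorted_eq_nil_iff]
    exact h
  have h0 : 0 < (PySem.List.sorted keys (fun x => x) false).length :=
    List.length_pos_iff.mpr hsne
  cases hmin : PySem.List.min? keys (fun x => x) with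
  | none =>
    rw [PySem.List.min?_eq_none_iff] at hmin
    exact absurd hmin h
  | some m =>
    have hms := hperm.mem_iff.mpr (PySem.List.min?_mem hmin)
    obtain ⟨j, hj, hsj⟩ := List.mem_iff_getElem.mp hms
    have h2 : (PySem.List.sorted keys (fun x => x) false)[0] ≤ m := by
      rw [← hsj]
      exact PySem.List.sorted_id_getElem_mono keys (Nat.zero_le j) hj
    have h1 : m ≤ (PySem.List.sorted keys (fun x => x) false)[0] :=
      PySem.List.min?_isMin hmin _ (hperm.mem_iff.mp (List.getElem_mem h0))
    rw [PySem.List.pyGetD_zero, List.getD_eq_getElem _ _ h0, Option.getD_some]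
    exact le_antisymm h2 h1

-- ===== VERDICT (by name: the statement is the Claim_ definition above) =====
theorem best_first_action_py_spec : Claim_equal_best_first_action_py := by
  intro actions connector_name _
  unfold Spec_best_first_action_py best_first_action_py best_first_action_py_alt
  dsimp only
  rw [stage1, stage2]
  cases PySem.List.min? ((actions.map (·.1)).filter (fun a => pvRank.contains a)) (fun a => pvRank.getD a 0) with
  | some m => rfl
  | none =>
    cases PySem.List.min? ((actions.map (·.1)).filter (fun a => PySem.Str.startswith a "list_" || PySem.Str.startswith a "get_")) (fun x => x) with
    | some m => rfl
    | none =>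
      by_cases he : actions.isEmpty
      · simp [he]
      · simp only [he]
        apply stage3
        simp [List.isEmpty_iff] at he
        simp [he]
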